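-- pv_equiv track=rewrite | github.com/Ectrox-Lab/atlas-hec-v2.1 | experiments/superbrain/p6/test_p6_emergent_interactions.py | _detect_repair_loop
-- ===== SOURCE A (Python) =====
-- from typing import List, Dict, Set, Any
--
-- def _detect_repair_loop(drift_pattern: List[bool]) -> bool:
--     """Detect repeated drift/recover cycles"""
--     if len(drift_pattern) < 4:
--         return False
--
--     # Look for True-False-True-False pattern (repeated drift)
--     cycles = 0
--     for i in range(len(drift_pattern) - 3):
--         if (drift_pattern[i] and not drift_pattern[i+1] and
--             drift_pattern[i+2] and not drift_pattern[i+3]):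
--             cycles += 1
--
--     return cycles >= 2
-- ===== SOURCE B (Python) =====
-- def _detect_repair_loop(drift_pattern):
--     """Detect repeated drift/recover cycles via run-length encoding.
--
--     A TFTF window starts exactly at the last element of a True-run that is
--     followed by a singleton False-run and a singleton True-run (and then a
--     False); so count True-runs followed by two singleton runs and a 4th run.
--     """
--     runs = []
--     i, n = 0, len(drift_pattern)
--     while i < n:
--         j = i + 1
--         while j < n and drift_pattern[j] == drift_pattern[i]:
--             j += 1
--         runs.append((drift_pattern[i], j - i))
--         i = j
--     cycles = sum(1 for (v, _), (_, m1), (_, m2), _ in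
--                  zip(runs, runs[1:], runs[2:], runs[3:])
--                  if v and m1 == 1 and m2 == 1)
--     return cycles >= 2
-- ===== Notes on version B (the rewrite author's own statement) =====
-- stated objective: alternative
-- what changed: A slides a four-index window over the boolean list counting T,F,T,F matches; B first run-length encodes the list into (value,length) runs and then counts True-runs that are followed by a singleton False-run, a singleton True-run and a fourth run, which is the same set of windows because a TFTF window starts exactly at the last element of such a True-run.
import Mathlib
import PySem

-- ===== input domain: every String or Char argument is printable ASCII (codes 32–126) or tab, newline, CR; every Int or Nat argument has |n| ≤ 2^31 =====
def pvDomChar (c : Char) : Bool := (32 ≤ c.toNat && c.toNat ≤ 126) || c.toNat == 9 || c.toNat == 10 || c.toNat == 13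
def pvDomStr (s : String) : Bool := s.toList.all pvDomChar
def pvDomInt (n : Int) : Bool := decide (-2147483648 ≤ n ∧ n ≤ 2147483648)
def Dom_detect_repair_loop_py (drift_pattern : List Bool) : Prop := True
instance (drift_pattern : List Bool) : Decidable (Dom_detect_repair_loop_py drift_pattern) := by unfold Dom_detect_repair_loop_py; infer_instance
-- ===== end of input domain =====

-- B replaces A's four-index sliding-window scan by run-length encoding followed by a scan over
-- the run list (a TFTF window starts exactly at the last element of a True-run followed by a
-- singleton False-run and a singleton True-run and a fourth run); objective: alternative.

-- ===== PORT A =====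
def detect_repair_loop_py (drift_pattern : List Bool) : Bool :=
  if drift_pattern.length < 4 then false
  else
    let cycles : Int := (PySem.List.pyRange 0 ((drift_pattern.length : Int) - 3) 1).foldl
      (fun c i =>
        if PySem.List.pyGetD drift_pattern i false
            && !PySem.List.pyGetD drift_pattern (i + 1) false
            && PySem.List.pyGetD drift_pattern (i + 2) false
            && !PySem.List.pyGetD drift_pattern (i + 3) false
        then c + 1 else c) 0
    decide (2 ≤ cycles)

-- ===== PORT B =====
-- B's run-length-encoding while loop: each outer iteration scans one run
-- (the inner `while drift_pattern[j] == drift_pattern[i]` = takeWhile/dropWhile of the suffix)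
-- and appends (value, length); rendered as structural recursion on the remaining suffix.
def pvRuns (xs : List Bool) : List (Bool × Nat) :=
  match xs with
  | [] => []
  | x :: t =>
    (x, 1 + (t.takeWhile (fun z => z == x)).length) :: pvRuns (t.dropWhile (fun z => z == x))
  termination_by xs.length
  decreasing_by
    simp only [List.length_cons]
    exact Nat.lt_succ_of_le (List.length_dropWhile_le _ _)

def detect_repair_loop_py_alt (drift_pattern : List Bool) : Bool :=
  let runs := pvRuns drift_pattern
  -- sum(1 for (v,_),(_,m1),(_,m2),_ in zip(runs, runs[1:], runs[2:], runs[3:]) if v and m1==1 and m2==1)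
  let cycles := ((runs.zip (runs.drop 1)).zip ((runs.drop 2).zip (runs.drop 3))).countP
      (fun p => p.1.1.1 && (p.1.2.2 == 1) && (p.2.1.2 == 1))
  decide (2 ≤ cycles)

-- ===== PRECONDITION & SPEC =====
def Spec_detect_repair_loop_py (drift_pattern : List Bool) (out : Bool) : Prop := out = detect_repair_loop_py_alt drift_pattern
instance (drift_pattern : List Bool) (out : Bool) : Decidable (Spec_detect_repair_loop_py drift_pattern out) := by unfold Spec_detect_repair_loop_py; infer_instance

-- ===== CLAIM (what is proved, stated in full; the proofs are below) =====
def Claim_equal_detect_repair_loop_py : Prop := ∀ (drift_pattern : List Bool), Dom_detect_repair_loop_py drift_pattern → Spec_detect_repair_loop_py drift_pattern (detect_repair_loop_py drift_pattern)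

-- ===== LEMMAS AND PROOFS =====

/-- A's window predicate over Nat indices. -/
def pvWindow (xs : List Bool) (i : Nat) : Bool :=
  xs.getD i false && !xs.getD (i + 1) false && xs.getD (i + 2) false && !xs.getD (i + 3) false

/-- Window count, peeling one element at a time. -/
def pvWinHit (a : Bool) (t : List Bool) : Nat :=
  match t with
  | b :: c :: d :: _ => if a && !b && c && !d then 1 else 0
  | _ => 0

def pvWin : List Bool → Nat
  | [] => 0
  | a :: t => pvWinHit a t + pvWin t

/-- Run-scan count, peeling one run at a time. -/
def pvRunHit (v : Bool) (rs : List (Bool × Nat)) : Nat :=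
  match rs with
  | (_, m1) :: (_, m2) :: _ :: _ => if v && (m1 == 1) && (m2 == 1) then 1 else 0
  | _ => 0

def pvRunCount : List (Bool × Nat) → Nat
  | [] => 0
  | (v, _) :: rs => pvRunHit v rs + pvRunCount rs

lemma pvRuns_cons (y : Bool) (t : List Bool) :
    pvRuns (y :: t) =
      (y, 1 + (t.takeWhile (fun z => z == y)).length) :: pvRuns (t.dropWhile (fun z => z == y)) := by
  rw [pvRuns]

lemma pvRuns_nil : pvRuns [] = [] := by
  rw [pvRuns]

lemma pvBeqSucc (k : Nat) : (1 + (k + 1) == 1) = false := by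
  rw [beq_eq_false_iff_ne]; omega

lemma pvWindow_succ (a : Bool) (t : List Bool) (k : Nat) :
    pvWindow (a :: t) (k + 1) = pvWindow t k := by
  simp [pvWindow]

/-- A's countP over range equals the element-peeling window count. -/
lemma pvCount_eq : ∀ xs : List Bool,
    (List.range (xs.length - 3)).countP (pvWindow xs) = pvWin xs
  | [] => by simp [pvWin]
  | [a] => by simp [pvWin, pvWinHit]
  | [a, b] => by simp [pvWin, pvWinHit]
  | [a, b, c] => by simp [pvWin, pvWinHit]
  | a :: b :: c :: d :: r => by
    have hlen : (a :: b :: c :: d :: r).length - 3 = ((b :: c :: d :: r).length - 3) + 1 := by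
      simp
    rw [hlen, List.range_succ_eq_map, List.countP_cons, List.countP_map]
    have hshift : (pvWindow (a :: b :: c :: d :: r) ∘ (· + 1)) = pvWindow (b :: c :: d :: r) := by
      funext k; simp [Function.comp, pvWindow_succ]
    rw [hshift, pvCount_eq (b :: c :: d :: r)]
    have hw : pvWindow (a :: b :: c :: d :: r) 0 = (a && !b && c && !d) := by
      simp [pvWindow]
    rw [hw]
    show pvWin (b :: c :: d :: r) + _ = pvWin (a :: b :: c :: d :: r)
    simp [pvWin, pvWinHit, Nat.add_comm]

/-- B's zip-countP equals the run-peeling count. -/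
lemma pvZip_eq : ∀ rs : List (Bool × Nat),
    ((rs.zip (rs.drop 1)).zip ((rs.drop 2).zip (rs.drop 3))).countP
      (fun p => p.1.1.1 && (p.1.2.2 == 1) && (p.2.1.2 == 1)) = pvRunCount rs
  | [] => by simp [pvRunCount]
  | [r0] => by simp [pvRunCount, pvRunHit]
  | [r0, r1] => by simp [pvRunCount, pvRunHit]
  | [r0, r1, r2] => by simp [pvRunCount, pvRunHit]
  | r0 :: r1 :: r2 :: r3 :: t => by
    have ih := pvZip_eq (r1 :: r2 :: r3 :: t)
    simp only [List.drop, List.zip_cons_cons, List.countP_cons] at ih ⊢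
    rw [ih]
    rcases r0 with ⟨v, n⟩; rcases r1 with ⟨v1, m1⟩; rcases r2 with ⟨v2, m2⟩
    simp [pvRunCount, pvRunHit]
    exact Nat.add_comm _ _

/-- Head contribution: a window starting at the first element of a fresh run equals
    the run-pattern hit on the RLE of the suffix starting at that run. -/
lemma pvHit_eq (x b : Bool) (t' : List Bool) (hbx : b ≠ x) :
    pvWinHit x (b :: t') = pvRunHit x (pvRuns (b :: t')) := by
  cases x with
  | false =>
    have hL : pvWinHit false (b :: t') = 0 := by
      rcases t' with _ | ⟨c, _ | ⟨d, r⟩⟩ <;> simp [pvWinHit]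
    have hR : ∀ rs : List (Bool × Nat), pvRunHit false rs = 0 := by
      intro rs
      rcases rs with _ | ⟨⟨w1, m1⟩, _ | ⟨⟨w2, m2⟩, _ | ⟨a3, rr⟩⟩⟩ <;> simp [pvRunHit]
    rw [hL, hR]
  | true =>
    have hb : b = false := by revert hbx; cases b <;> simp
    subst hb
    rcases t' with _ | ⟨c, t''⟩
    · simp [pvWinHit, pvRuns_cons, pvRuns_nil, pvRunHit]
    cases c with
    | false =>
      have hL : pvWinHit true (false :: false :: t'') = 0 := by
        rcases t'' with _ | ⟨d, r⟩ <;> simp [pvWinHit]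
      rw [hL, pvRuns_cons false (false :: t'')]
      have htw : (false :: t'').takeWhile (fun z => z == false) =
          false :: t''.takeWhile (fun z => z == false) := by simp
      rw [htw]
      simp only [List.length_cons]
      generalize pvRuns ((false :: t'').dropWhile (fun z => z == false)) = R
      rcases R with _ | ⟨⟨w1, m1⟩, _ | ⟨⟨w2, m2⟩, R'⟩⟩ <;> simp [pvRunHit, pvBeqSucc]
    | true =>
      rw [pvRuns_cons false (true :: t'')]
      have h1 : (true :: t'').takeWhile (fun z => z == false) = [] := by simp
      have h2 : (true :: t'').dropWhile (fun z => z == false) = true :: t'' := by simp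
      rw [h1, h2, pvRuns_cons true t'']
      rcases t'' with _ | ⟨d, r⟩
      · simp [pvWinHit, pvRuns_nil, pvRunHit]
      cases d with
      | false =>
        have h3 : (false :: r).takeWhile (fun z => z == true) = [] := by simp
        have h4 : (false :: r).dropWhile (fun z => z == true) = false :: r := by simp
        rw [h3, h4, pvRuns_cons false r]
        simp [pvWinHit, pvRunHit]
      | true =>
        have h3 : (true :: r).takeWhile (fun z => z == true) =
            true :: r.takeWhile (fun z => z == true) := by simp
        rw [h3]
        simp only [List.length_cons]
        generalize pvRuns ((true :: r).dropWhile (fun z => z == true)) = R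
        rcases R with _ | ⟨a1, R'⟩ <;> simp [pvWinHit, pvRunHit, pvBeqSucc]

/-- Main bridge: element-peeling window count equals run-peeling count of the RLE. -/
lemma pvMain : ∀ (n : Nat) (xs : List Bool), xs.length ≤ n →
    pvWin xs = pvRunCount (pvRuns xs)
  | 0, xs, h => by
    have : xs = [] := List.eq_nil_of_length_eq_zero (Nat.le_zero.mp h)
    subst this; simp [pvWin, pvRuns, pvRunCount]
  | n + 1, [], _ => by simp [pvWin, pvRuns, pvRunCount]
  | n + 1, [x], _ => by simp [pvWin, pvWinHit, pvRuns, pvRunCount, pvRunHit]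
  | n + 1, x :: b :: t', h => by
    have hlen : (b :: t').length ≤ n := by simp at h ⊢; omega
    by_cases hbx : b = x
    · subst hbx
      -- head element merges into the first run: no window can start on it,
      -- and pvRunCount ignores the first run's length
      have hw : pvWin (b :: b :: t') = pvWin (b :: t') := by
        rcases t' with _ | ⟨c, _ | ⟨d, r⟩⟩ <;> simp [pvWin, pvWinHit]
      have ih := pvMain n (b :: t') hlen
      rw [hw, ih, pvRuns_cons b t', pvRuns_cons b (b :: t')]
      have h1 : (b :: t').takeWhile (fun z => z == b) = b :: t'.takeWhile (fun z => z == b) := by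
        simp
      have h2 : (b :: t').dropWhile (fun z => z == b) = t'.dropWhile (fun z => z == b) := by
        simp
      rw [h1, h2]
      simp [pvRunCount]
    · -- head element opens a fresh singleton run
      have hbx' : (b == x) = false := by simp [hbx]
      have hr : pvRuns (x :: b :: t') = (x, 1) :: pvRuns (b :: t') := by
        rw [pvRuns_cons x (b :: t')]
        simp [hbx']
      have ih := pvMain n (b :: t') hlen
      rw [hr]
      show pvWinHit x (b :: t') + pvWin (b :: t') =
        pvRunHit x (pvRuns (b :: t')) + pvRunCount (pvRuns (b :: t'))
      rw [ih, pvHit_eq x b t' hbx]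

-- ===== VERDICT (by name: the statement is the Claim_ definition above) =====
theorem detect_repair_loop_py_spec : Claim_equal_detect_repair_loop_py := by
  intro xs _
  unfold Spec_detect_repair_loop_py
  simp only [detect_repair_loop_py, detect_repair_loop_py_alt]
  rw [pvZip_eq, ← pvMain xs.length xs le_rfl, ← pvCount_eq]
  by_cases h : xs.length < 4
  · rw [if_pos h]
    have h0 : xs.length - 3 = 0 := by omega
    simp [h0]
  · rw [if_neg h]
    rw [Nat.not_lt] at h
    rw [PySem.List.foldl_if_add_one, PySem.List.pyRange_one, List.countP_map]
    have hc : ((fun i => PySem.List.pyGetD xs i false && !PySem.List.pyGetD xs (i + 1) false &&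
          PySem.List.pyGetD xs (i + 2) false && !PySem.List.pyGetD xs (i + 3) false) ∘
          (fun k : Nat => (0 : Int) + ↑k)) = pvWindow xs := by
      funext k
      simp only [Function.comp]
      have h2 : (0 : Int) + ↑k + 1 = ((k + 1 : Nat) : Int) := by push_cast; ring
      have h3 : (0 : Int) + ↑k + 2 = ((k + 2 : Nat) : Int) := by push_cast; ring
      have h4 : (0 : Int) + ↑k + 3 = ((k + 3 : Nat) : Int) := by push_cast; ring
      have h1 : (0 : Int) + ↑k = ((k : Nat) : Int) := by ring
      rw [h2, h3, h4, h1]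
      simp only [PySem.List.pyGetD_natCast, pvWindow, List.getD_eq_getElem?_getD]
    rw [hc]
    have hn : ((xs.length : Int) - 3 - 0).toNat = xs.length - 3 := by omega
    rw [hn]
    simp only [decide_eq_decide]
    omega
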